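-- pv_equiv track=rewrite | github.com/tiendm1991/python | DynamicPrograming/minRemovalTo2MinMoreThanMax.py | minRemovalTo2MinMoreThanMax
-- ===== SOURCE A (Python) =====
-- def minRemovalTo2MinMoreThanMax(arr):
--     arr.sort()
--     n = len(arr)
--     dp = [1 for i in range(n)]
--     for i in range(1, n):
--         for j in range(i):
--             if arr[i] < 2 * arr[j]:
--                 dp[i] = i - j + 1
--                 break
--     return n - max(dp)
-- ===== SOURCE B (Python) =====
-- def minRemovalTo2MinMoreThanMax(arr):
--     arr.sort()
--     n = len(arr)
--     best = 0
--     j = 0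
--     for i in range(n):
--         while j < i and arr[i] >= 2 * arr[j]:
--             j += 1
--         if i - j + 1 > best:
--             best = i - j + 1
--     return n - best
-- ===== Notes on version B (the rewrite author's own statement) =====
-- stated objective: faster
-- what changed: Replace A's quadratic per-index backward scan (dp table + inner break loop) by a single sliding-window two-pointer pass over the sorted array: the left pointer only ever advances because the smallest valid window start is monotone in the right end.
-- crash fix: On the empty list A raises ValueError (max of an empty dp list) while B naturally returns 0 (no elements to remove). — e.g. on minRemovalTo2MinMoreThanMax([]): A raises ValueError, B returns 0
import Mathlib
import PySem

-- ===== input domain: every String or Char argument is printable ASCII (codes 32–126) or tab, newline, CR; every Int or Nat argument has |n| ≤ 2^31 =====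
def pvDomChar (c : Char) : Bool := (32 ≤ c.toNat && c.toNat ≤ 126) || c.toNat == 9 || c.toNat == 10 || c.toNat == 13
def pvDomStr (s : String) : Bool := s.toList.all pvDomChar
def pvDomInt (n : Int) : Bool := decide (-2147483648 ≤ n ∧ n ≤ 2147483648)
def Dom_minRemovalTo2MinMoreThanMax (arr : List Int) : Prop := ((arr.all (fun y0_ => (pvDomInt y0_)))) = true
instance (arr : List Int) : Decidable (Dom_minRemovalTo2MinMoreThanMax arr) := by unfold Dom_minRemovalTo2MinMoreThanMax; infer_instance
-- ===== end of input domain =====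

-- B replaces A's quadratic dp inner scan with a two-pointer sliding window over the sorted
-- array (objective: faster, asymptotic). Both A and B sort their argument in place in Python;
-- the equivalence proved here is about the return value (the mutation is identical in both).

-- ===== PORT A =====
-- inner 'for j in range(i): if arr[i] < 2*arr[j]: dp[i] = i-j+1; break' (else dp[i] stays 1)
def pvFindJ (s : List Int) (i j : Nat) : Int :=
  if j < i then
    if s.getD i 0 < 2 * s.getD j 0 then (i : Int) - (j : Int) + 1
    else pvFindJ s i (j + 1)
  else 1
termination_by i - j

def minRemovalTo2MinMoreThanMax (arr : List Int) : Int :=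
  let s := PySem.List.sorted arr (fun x => x)
  let n := s.length
  let dp0 : List Int := (List.range n).map (fun _ => (1 : Int))
  let dp := (PySem.List.pyRange 1 (n : Int) 1).foldl
      (fun dp i => dp.set i.toNat (pvFindJ s i.toNat 0)) dp0
  (n : Int) - (PySem.List.max? dp (fun y => y)).getD 0   -- max(dp): raises on empty dp → Pre_

-- ===== PORT B =====
-- 'while j < i and arr[i] >= 2 * arr[j]: j += 1'
def pvBWhile (s : List Int) (i j : Nat) : Nat :=
  if j < i ∧ 2 * s.getD j 0 ≤ s.getD i 0 then pvBWhile s i (j + 1) else j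
termination_by i - j
decreasing_by omega

def minRemovalTo2MinMoreThanMax_alt (arr : List Int) : Int :=
  let s := PySem.List.sorted arr (fun x => x)
  let n := s.length
  let st := (List.range n).foldl
      (fun (st : Nat × Int) i =>
        let j := pvBWhile s i st.1
        (j, if st.2 < (i : Int) - (j : Int) + 1 then (i : Int) - (j : Int) + 1 else st.2))
      (0, 0)
  (n : Int) - st.2

-- ===== PRECONDITION & SPEC =====
-- Pre_ excludes only the empty list, on which Python A raises ValueError (max of empty list).
def Pre_minRemovalTo2MinMoreThanMax (arr : List Int) : Prop := arr ≠ []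
instance (arr : List Int) : Decidable (Pre_minRemovalTo2MinMoreThanMax arr) := by
  unfold Pre_minRemovalTo2MinMoreThanMax; infer_instance
def pvWitness_minRemovalTo2MinMoreThanMax : List Int := [4, 1, 3, 2, 10]

-- On the empty list A raises ValueError (max of an empty dp list) while B naturally returns 0.
def Raises_minRemovalTo2MinMoreThanMax (arr : List Int) : Prop := arr = []
instance (arr : List Int) : Decidable (Raises_minRemovalTo2MinMoreThanMax arr) := by
  unfold Raises_minRemovalTo2MinMoreThanMax; infer_instance
def pvRaiseWitness_minRemovalTo2MinMoreThanMax : List Int := []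
def pvRaiseWitnessOut_minRemovalTo2MinMoreThanMax : Int := 0

def Spec_minRemovalTo2MinMoreThanMax (arr : List Int) (out : Int) : Prop :=
  out = minRemovalTo2MinMoreThanMax_alt arr
instance (arr : List Int) (out : Int) : Decidable (Spec_minRemovalTo2MinMoreThanMax arr out) := by
  unfold Spec_minRemovalTo2MinMoreThanMax; infer_instance

-- ===== CLAIM (what is proved, stated in full; the proofs are below) =====
def Claim_equal_minRemovalTo2MinMoreThanMax : Prop :=
  ∀ (arr : List Int), Dom_minRemovalTo2MinMoreThanMax arr →
    Pre_minRemovalTo2MinMoreThanMax arr →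
    Spec_minRemovalTo2MinMoreThanMax arr (minRemovalTo2MinMoreThanMax arr)

def Claim_raises_minRemovalTo2MinMoreThanMax : Prop :=
  (∀ (arr : List Int), Dom_minRemovalTo2MinMoreThanMax arr →
      Raises_minRemovalTo2MinMoreThanMax arr → ¬ Pre_minRemovalTo2MinMoreThanMax arr) ∧
  (Dom_minRemovalTo2MinMoreThanMax (pvRaiseWitness_minRemovalTo2MinMoreThanMax) ∧
   Raises_minRemovalTo2MinMoreThanMax (pvRaiseWitness_minRemovalTo2MinMoreThanMax) ∧
   minRemovalTo2MinMoreThanMax_alt (pvRaiseWitness_minRemovalTo2MinMoreThanMax) =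
     pvRaiseWitnessOut_minRemovalTo2MinMoreThanMax)

-- ===== LEMMAS AND PROOFS =====

-- "every k below j was skipped by the while loop at right end i"
def pvP (s : List Int) (i j : Nat) : Prop :=
  ∀ k, k < j → k < i ∧ 2 * s.getD k 0 ≤ s.getD i 0

theorem pvBWhile_le (s : List Int) (i : Nat) : ∀ j, j ≤ i → pvBWhile s i j ≤ i := by
  intro j
  fun_induction pvBWhile s i j with
  | case1 j h ih => intro _; exact ih (by omega)
  | case2 j h => intro hj; exact hj

theorem pvBWhile_P (s : List Int) (i : Nat) :
    ∀ j, pvP s i j → pvP s i (pvBWhile s i j) := by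
  intro j
  fun_induction pvBWhile s i j with
  | case1 j h ih =>
      intro hp
      apply ih
      intro k hk
      rcases Nat.lt_or_ge k j with hkj | hkj
      · exact hp k hkj
      · have : k = j := by omega
        subst this; exact h
  | case2 j h => intro hp; exact hp

theorem pvBWhile_skip (s : List Int) (i : Nat) :
    ∀ j, pvP s i j → pvBWhile s i 0 = pvBWhile s i j := by
  intro j
  induction j with
  | zero => intro _; rfl
  | succ j ih =>
      intro hp
      have hpj : pvP s i j := fun k hk => hp k (by omega)
      rw [ih hpj]
      have hc := hp j (by omega)
      rw [pvBWhile, if_pos hc]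

theorem pvFindJ_eq_bwhile (s : List Int) (i : Nat) :
    ∀ j, j ≤ i → pvFindJ s i j = (i : Int) - (pvBWhile s i j : Int) + 1 := by
  intro j
  fun_induction pvFindJ s i j with
  | case1 j h hlt =>
      intro _
      rw [pvBWhile, if_neg (by rintro ⟨-, hc⟩; omega)]
  | case2 j h hlt ih =>
      intro _
      have hb : pvBWhile s i j = pvBWhile s i (j + 1) := by
        rw [pvBWhile, if_pos ⟨h, by omega⟩]
      rw [ih (by omega), hb]
  | case3 j h =>
      intro hj
      rw [pvBWhile, if_neg (by omega)]
      have : j = i := by omega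
      subst this; omega

theorem pvW_ge_one (s : List Int) (k : Nat) :
    (1 : Int) ≤ (k : Int) - (pvBWhile s k 0 : Int) + 1 := by
  have h := pvBWhile_le s k 0 (Nat.zero_le _)
  omega

theorem pv_foldB (s : List Int)
    (hs : ∀ p q, p ≤ q → q < s.length → s.getD p 0 ≤ s.getD q 0) :
    ∀ (b a J : Nat) (best : Int), a + b ≤ s.length → (b = 0 ∨ pvP s a J) →
      ((List.range' a b).foldl
        (fun (st : Nat × Int) i =>
          let j := pvBWhile s i st.1
          (j, if st.2 < (i : Int) - (j : Int) + 1 then (i : Int) - (j : Int) + 1 else st.2))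
        (J, best)).2
      = (List.range' a b).foldl
          (fun (bst : Int) (k : Nat) => max bst ((k : Int) - (pvBWhile s k 0 : Int) + 1)) best := by
  intro b
  induction b with
  | zero => intro a J best _ _; rfl
  | succ b ih =>
      intro a J best hlen hP
      have hp : pvP s a J := by
        rcases hP with h | h
        · omega
        · exact h
      have hskip : pvBWhile s a J = pvBWhile s a 0 := (pvBWhile_skip s a J hp).symm
      rw [List.range'_succ]
      simp only [List.foldl_cons, hskip]
      have hmax : (if best < (a : Int) - (pvBWhile s a 0 : Int) + 1
            then (a : Int) - (pvBWhile s a 0 : Int) + 1 else best)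
          = max best ((a : Int) - (pvBWhile s a 0 : Int) + 1) := by
        rcases lt_or_ge best ((a : Int) - (pvBWhile s a 0 : Int) + 1) with h | h
        · rw [if_pos h, max_eq_right (le_of_lt h)]
        · rw [if_neg (not_lt.2 h), max_eq_left h]
      rw [hmax]
      apply ih
      · omega
      · rcases Nat.eq_zero_or_pos b with hb | hb
        · exact Or.inl hb
        · refine Or.inr ?_
          have h0 : pvP s a (pvBWhile s a 0) :=
            pvBWhile_P s a 0 (fun k hk => absurd hk (by omega))
          intro k hk
          obtain ⟨hk1, hk2⟩ := h0 k hk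
          refine ⟨by omega, le_trans hk2 (hs a (a + 1) (by omega) (by omega))⟩

theorem pv_set_commute (s : List Int) :
    ∀ (R : List Int) (dp : List Int) (x : Int),
      (∀ i ∈ R, (0:Int) ≤ i ∧ i.toNat < dp.length) →
      R.foldl (fun dp i => dp.set i.toNat (pvFindJ s i.toNat 0)) (dp ++ [x])
        = (R.foldl (fun dp i => dp.set i.toNat (pvFindJ s i.toNat 0)) dp) ++ [x] := by
  intro R
  induction R with
  | nil => intro dp x _; rfl
  | cons i R ih =>
      intro dp x h
      have hi := h i (List.mem_cons_self)
      simp only [List.foldl_cons]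
      rw [List.set_append, if_pos hi.2]
      apply ih
      intro i' hi'
      have := h i' (List.mem_cons_of_mem _ hi')
      simpa [List.length_set] using this

theorem pv_dpList (s : List Int) :
    ∀ (n : Nat),
      (PySem.List.pyRange 1 (n : Int) 1).foldl
        (fun dp i => dp.set i.toNat (pvFindJ s i.toNat 0))
        ((List.range n).map (fun _ => (1 : Int)))
      = (List.range n).map (fun k => pvFindJ s k 0) := by
  intro n
  induction n with
  | zero => simp [PySem.List.pyRange_one_eq_nil]
  | succ n ih =>
      rcases Nat.eq_zero_or_pos n with rfl | hn
      · have h0 : pvFindJ s 0 0 = 1 := by rw [pvFindJ]; simp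
        simp [h0]
      · have hcast : (((n + 1 : Nat)) : Int) = (n : Int) + 1 := by push_cast; ring
        rw [hcast, PySem.List.pyRange_one_succ_right (by exact_mod_cast hn)]
        rw [List.foldl_append]
        have hdp0 : (List.range (n + 1)).map (fun _ => (1 : Int))
            = (List.range n).map (fun _ => (1 : Int)) ++ [1] := by
          rw [List.range_succ, List.map_append]; rfl
        rw [hdp0]
        rw [pv_set_commute s _ _ _ (by
          intro i hi
          have hmem := (PySem.List.mem_pyRange_one).1 hi
          constructor
          · omega
          · simp only [List.length_map, List.length_range]; omega)]
        rw [ih]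
        simp only [List.foldl_cons, List.foldl_nil]
        rw [List.set_append]
        simp only [List.length_map, List.length_range, Int.toNat_natCast]
        rw [if_neg (by omega)]
        simp only [Nat.sub_self, List.set_cons_zero]
        rw [List.range_succ, List.map_append]
        simp

theorem pv_maxlist (f : Nat → Int) :
    ∀ (l : List Nat), l ≠ [] → (∀ k ∈ l, (1:Int) ≤ f k) →
      (PySem.List.max? (l.map f) (fun y => y)).getD 0
        = l.foldl (fun b k => max b (f k)) 0 := by
  intro l hne hf
  cases l with
  | nil => exact absurd rfl hne
  | cons k t =>
      rw [List.map_cons, PySem.List.max?_id_cons]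
      simp only [Option.getD_some]
      rw [List.foldl_map, List.foldl_cons]
      have hk : max (0:Int) (f k) = f k :=
        max_eq_right (le_trans zero_le_one (hf k List.mem_cons_self))
      rw [hk]

-- ===== VERDICT (by name: the statement is the Claim_ definition above) =====
theorem minRemovalTo2MinMoreThanMax_spec : Claim_equal_minRemovalTo2MinMoreThanMax := by
  intro arr _ hpre
  unfold Spec_minRemovalTo2MinMoreThanMax
  unfold minRemovalTo2MinMoreThanMax minRemovalTo2MinMoreThanMax_alt
  have hs : ∀ p q, p ≤ q → q < (PySem.List.sorted arr (fun x => x)).length →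
      (PySem.List.sorted arr (fun x => x)).getD p 0 ≤ (PySem.List.sorted arr (fun x => x)).getD q 0 := by
    intro p q hpq hq
    rw [List.getD_eq_getElem _ _ (lt_of_le_of_lt hpq hq), List.getD_eq_getElem _ _ hq]
    exact PySem.List.sorted_id_getElem_mono arr hpq hq
  have hne : PySem.List.sorted arr (fun x => x) ≠ [] := by
    intro h
    exact hpre ((PySem.List.sorted_eq_nil_iff arr _ _).1 h)
  have hn : 0 < (PySem.List.sorted arr (fun x => x)).length := List.length_pos_of_ne_nil hne
  simp only []
  rw [pv_dpList (PySem.List.sorted arr (fun x => x))]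
  rw [List.map_congr_left (fun k _ => pvFindJ_eq_bwhile (PySem.List.sorted arr (fun x => x)) k 0 (Nat.zero_le _))]
  rw [pv_maxlist _ _ (by simpa [List.range_eq_nil, List.length_eq_zero_iff] using hpre)
        (fun k _ => pvW_ge_one (PySem.List.sorted arr (fun x => x)) k)]
  rw [List.range_eq_range']
  rw [pv_foldB (PySem.List.sorted arr (fun x => x)) hs _ 0 0 0 (by omega)
        (Or.inr (fun k hk => absurd hk (by omega)))]

theorem minRemovalTo2MinMoreThanMax_raises : Claim_raises_minRemovalTo2MinMoreThanMax := by
  unfold Claim_raises_minRemovalTo2MinMoreThanMax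
  exact ⟨fun arr _ hr hp => hp hr, by decide⟩

-- self-check: the raise witness lies in Raises_ and B's port returns the stated value there
theorem pvRaiseWitness_minRemovalTo2MinMoreThanMax_ok :
    Raises_minRemovalTo2MinMoreThanMax pvRaiseWitness_minRemovalTo2MinMoreThanMax ∧
      minRemovalTo2MinMoreThanMax_alt pvRaiseWitness_minRemovalTo2MinMoreThanMax =
        pvRaiseWitnessOut_minRemovalTo2MinMoreThanMax :=
  ⟨minRemovalTo2MinMoreThanMax_raises.2.2.1, minRemovalTo2MinMoreThanMax_raises.2.2.2⟩
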